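-- pv_equiv track=rewrite | github.com/boppreh/adventofcode | 3.py | visited
-- ===== SOURCE A (Python) =====
-- def visited(instructions):
-- 	x, y = 0, 0
-- 	visited = {(x, y)}
-- 	for char in instructions:
-- 		if char == '>':
-- 			x += 1
-- 		elif char == '<':
-- 			x -= 1
-- 		elif char == '^':
-- 			y -= 1
-- 		elif char == 'v':
-- 			y += 1
-- 		visited.add((x, y))
--
-- 	return visited
-- ===== SOURCE B (Python) =====
-- def _step(p, c):
-- 	dx, dy = {'>': (1, 0), '<': (-1, 0), '^': (0, -1), 'v': (0, 1)}.get(c, (0, 0))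
-- 	return (p[0] + dx, p[1] + dy)
--
-- def _walk(p, s):
-- 	# returns (set of points visited walking s from p, including p; endpoint)
-- 	if len(s) == 0:
-- 		return {p}, p
-- 	if len(s) == 1:
-- 		q = _step(p, s[0])
-- 		return {p, q}, q
-- 	mid = len(s) // 2
-- 	left, e1 = _walk(p, s[:mid])
-- 	right, e2 = _walk(e1, s[mid:])
-- 	return left | right, e2
--
-- def visited(instructions):
-- 	pts, _end = _walk((0, 0), instructions)
-- 	return pts
-- ===== Notes on version B (the rewrite author's own statement) =====
-- stated objective: alternative
-- what changed: Replaces A's single fused update-and-insert loop with a divide-and-conquer recursion: the instruction string is split in half, each half's visited set and endpoint are computed recursively (the right half walked from the left half's endpoint), and the two sets are merged with set union.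
import Mathlib
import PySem

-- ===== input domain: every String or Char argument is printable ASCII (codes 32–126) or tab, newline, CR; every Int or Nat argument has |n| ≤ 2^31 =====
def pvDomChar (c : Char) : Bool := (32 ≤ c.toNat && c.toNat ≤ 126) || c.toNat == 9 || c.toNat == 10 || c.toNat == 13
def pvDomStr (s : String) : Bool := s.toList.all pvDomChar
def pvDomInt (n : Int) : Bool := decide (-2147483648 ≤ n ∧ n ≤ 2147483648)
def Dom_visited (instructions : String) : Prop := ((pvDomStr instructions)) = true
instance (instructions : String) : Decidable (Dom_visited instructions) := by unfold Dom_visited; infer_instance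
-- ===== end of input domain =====

-- B replaces A's fused single-pass loop by a divide-and-conquer recursion on the halved
-- instruction string, merging the two halves' visited sets with set union (alternative
-- decomposition, similar cost).

-- ===== PORT A =====
def visited (instructions : String) : List (Int × Int) :=
  (instructions.toList.foldl
    (fun (st : Int × Int × PySem.Set (Int × Int)) char =>
      let x := st.1
      let y := st.2.1
      let vis := st.2.2
      let xy : Int × Int :=
        if char = '>' then (x + 1, y)
        else if char = '<' then (x - 1, y)
        else if char = '^' then (x, y - 1)
        else if char = 'v' then (x, y + 1)
        else (x, y)
      (xy.1, xy.2, PySem.Set.add vis (xy.1, xy.2)))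
    (0, 0, PySem.Set.add PySem.Set.empty ((0 : Int), (0 : Int)))).2.2

-- ===== PORT B =====
def moveTable : PySem.Dict Char (Int × Int) :=
  PySem.Dict.ofList [('>', (1, 0)), ('<', (-1, 0)), ('^', (0, -1)), ('v', (0, 1))]

def stepB (p : Int × Int) (c : Char) : Int × Int :=
  let d := moveTable.getD c ((0 : Int), (0 : Int))
  (p.1 + d.1, p.2 + d.2)

-- Source B's `_walk`; the slices s[:mid], s[mid:] with 0 ≤ mid ≤ len(s) are exactly take/drop
def walkB (p : Int × Int) (s : List Char) : PySem.Set (Int × Int) × (Int × Int) :=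
  match s with
  | [] => (PySem.Set.add PySem.Set.empty p, p)
  | [c] =>
    let q := stepB p c
    (PySem.Set.add (PySem.Set.add PySem.Set.empty p) q, q)
  | a :: b :: t =>
    let s' := a :: b :: t
    let mid := s'.length / 2
    let l := walkB p (s'.take mid)
    let r := walkB l.2 (s'.drop mid)
    (PySem.Set.union l.1 r.1, r.2)
termination_by s.length
decreasing_by
  · simp [List.length_take]; omega
  · simp [List.length_drop]; omega

def visited_alt (instructions : String) : List (Int × Int) :=
  (walkB ((0 : Int), (0 : Int)) instructions.toList).1

-- ===== PRECONDITION & SPEC =====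
def Spec_visited (instructions : String) (out : List (Int × Int)) : Prop := out = visited_alt instructions
instance (instructions : String) (out : List (Int × Int)) : Decidable (Spec_visited instructions out) := by unfold Spec_visited; infer_instance

-- ===== CLAIM =====
def Claim_equal_visited : Prop := ∀ (instructions : String), Dom_visited instructions → Spec_visited instructions (visited instructions)

-- ===== LEMMAS AND PROOFS =====

-- the list of positions visited AFTER each step, starting from p
def tailPos (p : Int × Int) : List Char → List (Int × Int)
  | [] => []
  | c :: cs => stepB p c :: tailPos (stepB p c) cs

-- A's if-chain step equals B's dict-lookup step
lemma stepA_eq_stepB (p : Int × Int) (c : Char) :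
    (if c = '>' then (p.1 + 1, p.2)
     else if c = '<' then (p.1 - 1, p.2)
     else if c = '^' then (p.1, p.2 - 1)
     else if c = 'v' then (p.1, p.2 + 1)
     else p) = stepB p c := by
  have hi : moveTable.items =
      [('>', ((1 : Int), (0 : Int))), ('<', ((-1 : Int), (0 : Int))),
       ('^', ((0 : Int), (-1 : Int))), ('v', ((0 : Int), (1 : Int)))] := by decide
  unfold stepB
  by_cases h1 : c = '>'
  · subst h1
    have hv : moveTable.getD '>' ((0 : Int), (0 : Int)) = (1, 0) := by decide
    simp [hv]
  by_cases h2 : c = '<'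
  · subst h2
    have hv : moveTable.getD '<' ((0 : Int), (0 : Int)) = (-1, 0) := by decide
    simp [hv]; omega
  by_cases h3 : c = '^'
  · subst h3
    have hv : moveTable.getD '^' ((0 : Int), (0 : Int)) = (0, -1) := by decide
    simp [hv]; omega
  by_cases h4 : c = 'v'
  · subst h4
    have hv : moveTable.getD 'v' ((0 : Int), (0 : Int)) = (0, 1) := by decide
    simp [hv]
  have b1 : ('>' == c) = false := beq_eq_false_iff_ne.mpr (Ne.symm h1)
  have b2 : ('<' == c) = false := beq_eq_false_iff_ne.mpr (Ne.symm h2)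
  have b3 : ('^' == c) = false := beq_eq_false_iff_ne.mpr (Ne.symm h3)
  have b4 : ('v' == c) = false := beq_eq_false_iff_ne.mpr (Ne.symm h4)
  simp [h1, h2, h3, h4, PySem.Dict.getD, PySem.Dict.get?, hi, List.find?, b1, b2, b3, b4]

-- A's fold collects exactly the positions of tailPos into the set
lemma foldA_eq (cs : List Char) : ∀ (x y : Int) (vis : PySem.Set (Int × Int)),
    (cs.foldl
      (fun (st : Int × Int × PySem.Set (Int × Int)) char =>
        let x := st.1
        let y := st.2.1
        let vis := st.2.2
        let xy : Int × Int :=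
          if char = '>' then (x + 1, y)
          else if char = '<' then (x - 1, y)
          else if char = '^' then (x, y - 1)
          else if char = 'v' then (x, y + 1)
          else (x, y)
        (xy.1, xy.2, PySem.Set.add vis (xy.1, xy.2)))
      (x, y, vis)).2.2 = (tailPos (x, y) cs).foldl PySem.Set.add vis := by
  induction cs with
  | nil => intro x y vis; rfl
  | cons c cs ih =>
    intro x y vis
    simp only [List.foldl_cons, tailPos]
    have h : stepB (x, y) c = (if c = '>' then ((x : Int) + 1, y)
        else if c = '<' then (x - 1, y)
        else if c = '^' then (x, y - 1)
        else if c = 'v' then (x, y + 1)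
        else (x, y)) := (stepA_eq_stepB (x, y) c).symm
    rw [← h]
    simpa using ih (stepB (x, y) c).1 (stepB (x, y) c).2 (PySem.Set.add vis (stepB (x, y) c))

lemma tailPos_append (l r : List Char) : ∀ (p : Int × Int),
    tailPos p (l ++ r) = tailPos p l ++ tailPos (l.foldl stepB p) r := by
  induction l with
  | nil => intro p; simp [tailPos]
  | cons c cs ih => intro p; simp [tailPos, ih]

lemma endpoint_mem (l : List Char) : ∀ (p : Int × Int),
    l.foldl stepB p ∈ p :: tailPos p l := by
  induction l with
  | nil => intro p; simp
  | cons c cs ih =>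
    intro p
    simp only [List.foldl_cons, tailPos]
    rcases List.mem_cons.mp (ih (stepB p c)) with h | h
    · exact List.mem_cons.mpr (Or.inr (by simp [h]))
    · exact List.mem_cons.mpr (Or.inr (List.mem_cons.mpr (Or.inr h)))

-- folding add over a deduplicated list is folding it over the original
lemma update_ofList (s : PySem.Set (Int × Int)) (xs : List (Int × Int)) :
    PySem.Set.update s (PySem.Set.ofList xs) = PySem.Set.update s xs := by
  rw [PySem.Set.update_eq_append_filter, PySem.Set.update_eq_append_filter,
    PySem.Set.ofList_ofList]

lemma union_eq_ofList_append (xs ys : List (Int × Int)) :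
    PySem.Set.union (PySem.Set.ofList xs) (PySem.Set.ofList ys) =
      PySem.Set.ofList (xs ++ ys) := by
  rw [PySem.Set.ofList_append]
  show PySem.Set.update (PySem.Set.ofList xs) (PySem.Set.ofList ys) = _
  exact update_ofList _ _

theorem walkB_eq (p : Int × Int) (s : List Char) :
    walkB p s = (PySem.Set.ofList (p :: tailPos p s), s.foldl stepB p) := by
  match s with
  | [] => simp [walkB, tailPos, PySem.Set.ofList, PySem.Set.add, PySem.Set.empty]
  | [c] =>
    simp only [walkB, tailPos]
    rfl
  | a :: b :: t =>
    have hlen : (a :: b :: t).length = t.length + 2 := by simp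
    have hmid1 : 1 ≤ (a :: b :: t).length / 2 := by omega
    have hmid2 : (a :: b :: t).length / 2 < (a :: b :: t).length := by omega
    unfold walkB
    simp only []
    rw [walkB_eq p ((a :: b :: t).take ((a :: b :: t).length / 2)),
        walkB_eq _ ((a :: b :: t).drop ((a :: b :: t).length / 2))]
    set mid := (a :: b :: t).length / 2 with hm
    set L := (a :: b :: t).take mid with hL
    set R := (a :: b :: t).drop mid with hR
    have hsplit : L ++ R = a :: b :: t := List.take_append_drop _ _
    have e1mem : L.foldl stepB p ∈ p :: tailPos p L := endpoint_mem L p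
    dsimp only
    rw [Prod.mk.injEq]
    refine ⟨?_, ?_⟩
    · -- sets agree
      show PySem.Set.union (PySem.Set.ofList (p :: tailPos p L))
          (PySem.Set.ofList (L.foldl stepB p :: tailPos (L.foldl stepB p) R)) = _
      rw [union_eq_ofList_append]
      have : (p :: tailPos p L) ++ L.foldl stepB p :: tailPos (L.foldl stepB p) R =
          ((p :: tailPos p L) ++ [L.foldl stepB p]) ++ tailPos (L.foldl stepB p) R := by
        simp
      rw [this, PySem.Set.ofList_append, PySem.Set.ofList_append_singleton,
          PySem.Set.add_of_mem (by simpa [PySem.Set.mem_ofList] using e1mem),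
          ← PySem.Set.ofList_append]
      have htail : tailPos p (a :: b :: t) = tailPos p L ++ tailPos (L.foldl stepB p) R := by
        conv_lhs => rw [← hsplit]
        exact tailPos_append L R p
      rw [htail, List.cons_append]
    · -- endpoints agree
      show R.foldl stepB (L.foldl stepB p) = _
      rw [← List.foldl_append, hsplit]
termination_by s.length
decreasing_by
  · simp [List.length_take]; omega
  · simp [List.length_drop]; omega

-- ===== VERDICT =====
theorem visited_spec : Claim_equal_visited := by
  intro s _
  unfold Spec_visited visited visited_alt
  rw [foldA_eq, walkB_eq]
  show _ = PySem.Set.ofList (((0 : Int), (0 : Int)) :: tailPos (0, 0) s.toList)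
  rw [PySem.Set.ofList_eq_foldl, List.foldl_cons]
  rfl
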